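-- pv_equiv track=rewrite | github.com/Ricko12vPL/Phyton | equal sums even odd position.py | sum_digits_even_odd_positions
-- ===== SOURCE A (Python) =====
-- def sum_digits_even_odd_positions(num):
--     num_str = str(num)
--     even_sum = 0
--     odd_sum = 0
--
--     for i in range(len(num_str)):
--         digit = int(num_str[i])
--         if i % 2 == 0:  # Nieparzysta pozycja (indeks 0, 2, 4...)
--             odd_sum += digit
--         else:  # Parzysta pozycja (indeks 1, 3, 5...)
--             even_sum += digit
--
--     return even_sum, odd_sum
-- ===== SOURCE B (Python) =====
-- def sum_digits_even_odd_positions(num):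
--     def go(ds, even_sum, odd_sum):
--         if not ds:
--             return even_sum, odd_sum
--         if len(ds) == 1:
--             return even_sum, odd_sum + int(ds[0])
--         return go(ds[2:], even_sum + int(ds[1]), odd_sum + int(ds[0]))
--     return go(str(num), 0, 0)
-- ===== Notes on version B (the rewrite author's own statement) =====
-- stated objective: alternative
-- what changed: Replaces the index loop with a per-iteration parity test by a pairwise recursion that consumes two digits per step (first to odd_sum, second to even_sum), so no index or parity is maintained.
import Mathlib
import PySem

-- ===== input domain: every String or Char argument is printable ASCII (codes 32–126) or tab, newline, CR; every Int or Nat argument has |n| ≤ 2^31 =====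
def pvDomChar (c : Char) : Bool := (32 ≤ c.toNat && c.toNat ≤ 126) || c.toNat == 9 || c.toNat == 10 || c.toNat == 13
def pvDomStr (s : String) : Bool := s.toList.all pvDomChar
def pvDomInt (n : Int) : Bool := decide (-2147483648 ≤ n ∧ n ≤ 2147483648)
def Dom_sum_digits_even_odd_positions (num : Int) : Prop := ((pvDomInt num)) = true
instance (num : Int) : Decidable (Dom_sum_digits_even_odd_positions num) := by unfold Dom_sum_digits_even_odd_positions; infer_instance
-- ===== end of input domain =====

-- B replaces A's parity-branched index loop by a pairwise recursion consuming two digits per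
-- step (alternative decomposition, same cost); equivalence proved for num ≥ 0 (A raises on '-').

-- int(one-char string); `none` would be Python's ValueError on a non-digit character, which
-- cannot occur inside Pre_ (str of a nonnegative int is all digits), so getD 0 is never taken there.
def pvDig (c : Char) : Int := (PySem.Int.ofChars? [c]).getD 0

-- ===== PORT A =====
def sum_digits_even_odd_positions (num : Int) : Int × Int :=
  -- num_str = str(num); for i in range(len(num_str)): digit = int(num_str[i]); parity branch
  -- (the index i is always in range, so pyGetD with a dummy default is exact there)
  (PySem.List.pyRange 0 ((PySem.Int.toChars num).length : Int) 1).foldl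
    (fun acc i =>
      let digit := pvDig (PySem.List.pyGetD (PySem.Int.toChars num) i ' ')
      if PySem.Int.mod i 2 = 0 then (acc.1, acc.2 + digit) else (acc.1 + digit, acc.2))
    (0, 0)

-- ===== PORT B =====
-- the inner recursive go(ds, even_sum, odd_sum) of Source B
def pvGo : List Char → Int → Int → Int × Int
  | [], e, o => (e, o)
  | [a], e, o => (e, o + pvDig a)
  | a :: b :: rest, e, o => pvGo rest (e + pvDig b) (o + pvDig a)

def sum_digits_even_odd_positions_alt (num : Int) : Int × Int :=
  pvGo (PySem.Int.toChars num) 0 0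

-- ===== PRECONDITION & SPEC =====
-- Python A raises ValueError (int('-')) on negative num; B raises identically there.
def Pre_sum_digits_even_odd_positions (num : Int) : Prop := 0 ≤ num
instance (num : Int) : Decidable (Pre_sum_digits_even_odd_positions num) := by
  unfold Pre_sum_digits_even_odd_positions; infer_instance
def pvWitness_sum_digits_even_odd_positions : Int := 123456

def Spec_sum_digits_even_odd_positions (num : Int) (out : Int × Int) : Prop :=
  out = sum_digits_even_odd_positions_alt num
instance (num : Int) (out : Int × Int) : Decidable (Spec_sum_digits_even_odd_positions num out) := by
  unfold Spec_sum_digits_even_odd_positions; infer_instance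

-- ===== CLAIM (what is proved, stated in full; the proofs are below) =====
def Claim_equal_sum_digits_even_odd_positions : Prop :=
  ∀ (num : Int), Dom_sum_digits_even_odd_positions num →
    Pre_sum_digits_even_odd_positions num →
    Spec_sum_digits_even_odd_positions num (sum_digits_even_odd_positions num)

-- ===== LEMMAS AND PROOFS =====

-- A's loop, seen over enumerate with an even start index, is B's pairwise recursion.
theorem pvLoopEq : ∀ (cs : List Char) (s : Int), PySem.Int.mod s 2 = 0 → ∀ (e o : Int),
    (PySem.List.enumerate cs s).foldl
      (fun (acc : Int × Int) (p : Int × Char) =>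
        if PySem.Int.mod p.1 2 = 0 then (acc.1, acc.2 + pvDig p.2)
        else (acc.1 + pvDig p.2, acc.2)) (e, o)
    = pvGo cs e o
  | [], s, hs, e, o => by simp [PySem.List.enumerate_nil, pvGo]
  | [a], s, hs, e, o => by
      have hs' : s % 2 = 0 := by simpa using hs
      simp [PySem.List.enumerate_cons, PySem.List.enumerate_nil, pvGo, hs']
  | a :: b :: rest, s, hs, e, o => by
      have hs' : s % 2 = 0 := by simpa using hs
      have h1 : PySem.Int.mod (s + 1) 2 ≠ 0 := by simp; omega
      have h2 : PySem.Int.mod (s + 1 + 1) 2 = 0 := by simp; omega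
      rw [PySem.List.enumerate_cons, PySem.List.enumerate_cons]
      simp only [List.foldl_cons, hs, h1, if_true, if_false]
      rw [pvLoopEq rest (s + 1 + 1) h2]
      rfl

-- ===== VERDICT (by name: the statement is the Claim_ definition above) =====
theorem sum_digits_even_odd_positions_spec : Claim_equal_sum_digits_even_odd_positions := by
  intro num _ _
  unfold Spec_sum_digits_even_odd_positions
  unfold sum_digits_even_odd_positions sum_digits_even_odd_positions_alt
  rw [← pvLoopEq (PySem.Int.toChars num) 0 (by decide) 0 0,
      PySem.List.enumerate_eq_map_pyRange (d := ' '), List.foldl_map]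
  simp only [PySem.List.len_eq]
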